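-- pv_equiv track=rewrite | github.com/angelowen/Footprintku | 初賽/code/Done02.py | extract_peek_ranges
-- ===== SOURCE A (Python) =====
-- def extract_peek_ranges(array_vals, minimun_val, minimun_range):
--     start_i = None
--     end_i = None
--     peek_ranges = []
--     #enumerate() 函數用於將數據對象組合為一個索引序列，同時列出數據和數據下標
--     for i, val in enumerate(array_vals):
--         if val > minimun_val and start_i is None:
--             start_i = i
--         elif val > minimun_val and start_i is not None:
--             pass
--         elif val < minimun_val and start_i is not None:
--             end_i = i
--             if end_i - start_i >= minimun_range:
--                 peek_ranges.append((start_i, end_i))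
--             start_i = None
--             end_i = None
--         elif val < minimun_val and start_i is None:
--             pass
--         # else:
--             # raise ValueError("cannot parse this case...")
--     return peek_ranges
-- ===== SOURCE B (Python) =====
-- def extract_peek_ranges(array_vals, minimun_val, minimun_range):
--     # Run-based scan: classify each value as +1/-1/0 against the threshold and
--     # jump over maximal runs of equal classification instead of stepping per element.
--     vals = list(array_vals)
--     n = len(vals)
--     peek_ranges = []
--     start_i = None
--     i = 0
--     while i < n:
--         sign = (vals[i] > minimun_val) - (vals[i] < minimun_val)
--         j = i + 1
--         while j < n and ((vals[j] > minimun_val) - (vals[j] < minimun_val)) == sign: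
--             j += 1
--         if sign > 0 and start_i is None:
--             start_i = i
--         elif sign < 0 and start_i is not None:
--             if i - start_i >= minimun_range:
--                 peek_ranges.append((start_i, i))
--             start_i = None
--         i = j
--     return peek_ranges
-- ===== Notes on version B (the rewrite author's own statement) =====
-- stated objective: alternative
-- what changed: Replaces the per-element enumerate state machine by a run-based scan that classifies each value as +1/-1/0 against the threshold and processes one maximal run of equal classification per outer step (open on the first index of a positive run, close on the first index of a negative run).
import Mathlib
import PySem

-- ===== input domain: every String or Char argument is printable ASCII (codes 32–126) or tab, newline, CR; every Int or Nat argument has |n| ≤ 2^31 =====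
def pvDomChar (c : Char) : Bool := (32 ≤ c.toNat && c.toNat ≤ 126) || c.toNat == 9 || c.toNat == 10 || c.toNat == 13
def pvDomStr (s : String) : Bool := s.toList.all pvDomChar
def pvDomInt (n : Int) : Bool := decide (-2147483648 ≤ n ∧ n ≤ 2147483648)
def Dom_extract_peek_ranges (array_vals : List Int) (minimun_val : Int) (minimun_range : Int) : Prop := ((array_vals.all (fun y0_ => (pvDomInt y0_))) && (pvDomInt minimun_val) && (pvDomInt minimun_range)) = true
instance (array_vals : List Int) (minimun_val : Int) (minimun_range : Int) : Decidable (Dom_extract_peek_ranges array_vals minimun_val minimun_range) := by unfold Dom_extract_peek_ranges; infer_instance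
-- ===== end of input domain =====

-- B replaces A's per-element enumerate state machine by a run-based scan over maximal
-- runs of equal classification (+1/-1/0 against the threshold); same O(n) cost ("alternative").

-- ===== PORT A =====
-- A's loop body as a step function over the state (start_i, end_i, peek_ranges)
def pvStepA (minimun_val minimun_range : Int)
    (st : Option Int × Option Int × List (Int × Int)) (iv : Int × Int) :
    Option Int × Option Int × List (Int × Int) :=
  if iv.2 > minimun_val ∧ st.1 = none then (some iv.1, st.2.1, st.2.2)
  else if iv.2 > minimun_val ∧ st.1 ≠ none then st
  else if iv.2 < minimun_val ∧ st.1 ≠ none then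
    -- end_i = i; maybe append; start_i = None; end_i = None
    (none, none,
      if iv.1 - st.1.getD 0 ≥ minimun_range then st.2.2 ++ [(st.1.getD 0, iv.1)] else st.2.2)
  else st

def extract_peek_ranges (array_vals : List Int) (minimun_val : Int) (minimun_range : Int) : List (Int × Int) :=
  ((PySem.List.enumerate array_vals 0).foldl (pvStepA minimun_val minimun_range)
    (none, none, [])).2.2

-- ===== PORT B =====
-- (v > m) - (v < m) of Source B
def pvSign (minimun_val v : Int) : Int :=
  (if v > minimun_val then 1 else 0) - (if v < minimun_val then 1 else 0)

-- the outer while-loop of Source B: one iteration per maximal run of equal classification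
def pvAltGo (minimun_val minimun_range : Int) (vs : List Int) (i : Int)
    (start_i : Option Int) (acc : List (Int × Int)) : List (Int × Int) :=
  match vs with
  | [] => acc
  | v :: tl =>
    let s := pvSign minimun_val v
    let rest := tl.dropWhile (fun w => pvSign minimun_val w == s)
    let j : Int := i + 1 + (tl.takeWhile (fun w => pvSign minimun_val w == s)).length
    if s > 0 ∧ start_i = none then
      pvAltGo minimun_val minimun_range rest j (some i) acc
    else if s < 0 ∧ start_i ≠ none then
      pvAltGo minimun_val minimun_range rest j none
        (if i - start_i.getD 0 ≥ minimun_range then acc ++ [(start_i.getD 0, i)] else acc)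
    else
      pvAltGo minimun_val minimun_range rest j start_i acc
termination_by vs.length
decreasing_by
  all_goals
    simp only [List.length_cons]
    exact Nat.lt_succ_of_le (List.length_dropWhile_le _ _)

def extract_peek_ranges_alt (array_vals : List Int) (minimun_val : Int) (minimun_range : Int) : List (Int × Int) :=
  pvAltGo minimun_val minimun_range array_vals 0 none []

-- ===== PRECONDITION & SPEC =====
def Spec_extract_peek_ranges (array_vals : List Int) (minimun_val : Int) (minimun_range : Int) (out : List (Int × Int)) : Prop := out = extract_peek_ranges_alt array_vals minimun_val minimun_range
instance (array_vals : List Int) (minimun_val : Int) (minimun_range : Int) (out : List (Int × Int)) : Decidable (Spec_extract_peek_ranges array_vals minimun_val minimun_range out) := by unfold Spec_extract_peek_ranges; infer_instance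

-- ===== CLAIM (what is proved, stated in full; the proofs are below) =====
def Claim_equal_extract_peek_ranges : Prop := ∀ (array_vals : List Int) (minimun_val : Int) (minimun_range : Int), Dom_extract_peek_ranges array_vals minimun_val minimun_range → Spec_extract_peek_ranges array_vals minimun_val minimun_range (extract_peek_ranges array_vals minimun_val minimun_range)

-- ===== LEMMAS AND PROOFS =====

-- an element whose classification matches the current state's shape leaves the state unchanged
lemma pvStepA_fix (m r v j : Int) (st : Option Int × Option Int × List (Int × Int))
    (h1 : 0 < pvSign m v → st.1 ≠ none) (h2 : pvSign m v < 0 → st.1 = none) :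
    pvStepA m r st (j, v) = st := by
  unfold pvSign at h1 h2
  unfold pvStepA
  by_cases hgt : v > m
  · have hlt : ¬ v < m := by omega
    simp only [hgt, hlt] at h1 h2
    have : st.1 ≠ none := h1 (by norm_num)
    simp [hgt, this]
  · by_cases hlt : v < m
    · simp only [hgt, hlt] at h1 h2
      have : st.1 = none := h2 (by norm_num)
      simp [hgt, hlt, this]
    · simp [hgt, hlt]

-- folding A's step over a run of equal classification that matches the state is a no-op
lemma pvFoldl_fix (m r s : Int) (run : List Int) (hrun : ∀ w ∈ run, pvSign m w = s)
    (st : Option Int × Option Int × List (Int × Int))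
    (h1 : 0 < s → st.1 ≠ none) (h2 : s < 0 → st.1 = none) :
    ∀ i : Int, List.foldl (pvStepA m r) st (PySem.List.enumerate run i) = st := by
  induction run with
  | nil => intro i; simp [PySem.List.enumerate_nil]
  | cons w tl ih =>
    intro i
    have hw : pvSign m w = s := hrun w (by simp)
    rw [PySem.List.enumerate_cons, List.foldl_cons,
        pvStepA_fix m r w i st (hw ▸ h1) (hw ▸ h2)]
    exact ih (fun x hx => hrun x (by simp [hx])) (i + 1)

-- main invariant: A's fold from state (start_i, none, acc) over values enumerated from i
-- computes exactly B's run-based loop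
lemma pvMain (m r : Int) : ∀ (n : Nat) (vs : List Int), vs.length ≤ n →
    ∀ (i : Int) (start_i : Option Int) (acc : List (Int × Int)),
    (List.foldl (pvStepA m r) (start_i, none, acc) (PySem.List.enumerate vs i)).2.2
      = pvAltGo m r vs i start_i acc := by
  intro n
  induction n with
  | zero =>
    intro vs hvs i start_i acc
    have : vs = [] := List.eq_nil_of_length_eq_zero (Nat.le_zero.mp hvs)
    subst this
    simp [PySem.List.enumerate_nil, pvAltGo]
  | succ n ih =>
    intro vs hvs i start_i acc
    match vs with
    | [] => simp [PySem.List.enumerate_nil, pvAltGo]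
    | v :: tl =>
      have hlen : tl.length ≤ n := by simpa using hvs
      set s := pvSign m v with hs
      set run := tl.takeWhile (fun w => pvSign m w == s) with hrundef
      set rest := tl.dropWhile (fun w => pvSign m w == s) with hrestdef
      have hsplit : tl = run ++ rest := (List.takeWhile_append_dropWhile ..).symm
      have hrest : rest.length ≤ n :=
        le_trans (List.length_dropWhile_le _ _) hlen
      have hrunmem : ∀ w ∈ run, pvSign m w = s := by
        intro w hw
        have := List.mem_takeWhile_imp hw
        exact (beq_iff_eq).mp this
      have henum : PySem.List.enumerate (v :: tl) i
          = (i, v) :: (PySem.List.enumerate run (i + 1)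
              ++ PySem.List.enumerate rest (i + 1 + run.length)) := by
        rw [PySem.List.enumerate_cons, hsplit, PySem.List.enumerate_append]
      rw [henum, List.foldl_cons, List.foldl_append]
      -- compute the first step and discharge each shape of the resulting state
      show (List.foldl (pvStepA m r)
        (List.foldl (pvStepA m r) (pvStepA m r (start_i, none, acc) (i, v))
          (PySem.List.enumerate run (i + 1)))
        (PySem.List.enumerate rest (i + 1 + run.length))).2.2 = _
      by_cases hgt : v > m
      · have hnlt : ¬ v < m := by omega
        have hs1 : s = 1 := by simp [hs, pvSign, hgt, hnlt]
        cases start_i with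
        | none =>
          have hstep : pvStepA m r ((none : Option Int), (none : Option Int), acc) (i, v)
              = (some i, none, acc) := by simp [pvStepA, hgt]
          rw [hstep, pvFoldl_fix m r s run hrunmem _ (by simp) (by omega)]
          rw [ih rest hrest _ (some i) acc]
          conv_rhs => rw [pvAltGo]
          simp only [← hs, hs1]
          norm_num
          simp only [hrundef, hrestdef, hs1]
        | some a =>
          have hstep : pvStepA m r (some a, (none : Option Int), acc) (i, v)
              = (some a, none, acc) := by simp [pvStepA, hgt]
          rw [hstep, pvFoldl_fix m r s run hrunmem _ (by simp) (by omega)]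
          rw [ih rest hrest _ (some a) acc]
          conv_rhs => rw [pvAltGo]
          simp only [← hs, hs1]
          norm_num
          simp [hrundef, hrestdef, hs1]
      · by_cases hlt : v < m
        · have hs1 : s = -1 := by simp [hs, pvSign, hgt, hlt]
          cases start_i with
          | none =>
            have hstep : pvStepA m r ((none : Option Int), (none : Option Int), acc) (i, v)
                = (none, none, acc) := by simp [pvStepA, hgt, hlt]
            rw [hstep, pvFoldl_fix m r s run hrunmem _ (by omega) (by simp)]
            rw [ih rest hrest _ none acc]
            conv_rhs => rw [pvAltGo]
            simp only [← hs, hs1]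
            norm_num
            simp only [hrundef, hrestdef, hs1]
          | some a =>
            have hstep : pvStepA m r (some a, (none : Option Int), acc) (i, v)
                = (none, none, if i - a ≥ r then acc ++ [(a, i)] else acc) := by
              simp [pvStepA, hgt, hlt]
            rw [hstep, pvFoldl_fix m r s run hrunmem _ (by omega) (by simp)]
            rw [ih rest hrest _ none _]
            conv_rhs => rw [pvAltGo]
            simp only [← hs, hs1]
            norm_num
            simp [hrundef, hrestdef, hs1]
        · have hs0 : s = 0 := by simp [hs, pvSign, hgt, hlt]
          have hstep : pvStepA m r (start_i, (none : Option Int), acc) (i, v)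
              = (start_i, none, acc) := by simp [pvStepA, hgt, hlt]
          rw [hstep, pvFoldl_fix m r s run hrunmem _ (by omega) (by omega)]
          rw [ih rest hrest _ start_i acc]
          conv_rhs => rw [pvAltGo]
          simp only [← hs, hs0]
          norm_num
          simp only [hrundef, hrestdef, hs0]

-- ===== VERDICT (by name: the statement is the Claim_ definition above) =====
theorem extract_peek_ranges_spec : Claim_equal_extract_peek_ranges := by
  intro array_vals m r _
  unfold Spec_extract_peek_ranges extract_peek_ranges extract_peek_ranges_alt
  exact pvMain m r array_vals.length array_vals (le_refl _) 0 none []
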